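-- pv_equiv track=rewrite | github.com/TDPatcher/TDPatcher | rq1_eval/2_prepare_test_set.py | get_pre_todo_context
-- ===== SOURCE A (Python) =====
-- def get_pre_todo_context( source_code, todo_lineno):
--     line_limit = 10
--     if todo_lineno - line_limit < source_code[0][0]:
--         start_lineno =  source_code[0][0]
--     else:
--         start_lineno = todo_lineno - line_limit
--     pre_todo_context = []
--     for e in source_code:
--         if e[0] >= start_lineno and e[0] < todo_lineno:
--             pre_todo_context.append( e )
--     return pre_todo_context[-2:]
-- ===== SOURCE B (Python) =====
-- def get_pre_todo_context(source_code, todo_lineno):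
--     line_limit = 10
--     first = source_code[0][0]
--     if todo_lineno - line_limit < first:
--         start_lineno = first
--     else:
--         start_lineno = todo_lineno - line_limit
--     buf = []
--     for e in reversed(source_code):
--         if start_lineno <= e[0] < todo_lineno:
--             buf.append(e)
--             if len(buf) == 2:
--                 break
--     buf.reverse()
--     return buf
-- ===== Notes on version B (the rewrite author's own statement) =====
-- stated objective: alternative
-- what changed: Instead of building the whole filtered list and slicing its last two elements, B scans source_code backwards keeping a bounded 2-element buffer with early termination, then reverses it.
import Mathlib
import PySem

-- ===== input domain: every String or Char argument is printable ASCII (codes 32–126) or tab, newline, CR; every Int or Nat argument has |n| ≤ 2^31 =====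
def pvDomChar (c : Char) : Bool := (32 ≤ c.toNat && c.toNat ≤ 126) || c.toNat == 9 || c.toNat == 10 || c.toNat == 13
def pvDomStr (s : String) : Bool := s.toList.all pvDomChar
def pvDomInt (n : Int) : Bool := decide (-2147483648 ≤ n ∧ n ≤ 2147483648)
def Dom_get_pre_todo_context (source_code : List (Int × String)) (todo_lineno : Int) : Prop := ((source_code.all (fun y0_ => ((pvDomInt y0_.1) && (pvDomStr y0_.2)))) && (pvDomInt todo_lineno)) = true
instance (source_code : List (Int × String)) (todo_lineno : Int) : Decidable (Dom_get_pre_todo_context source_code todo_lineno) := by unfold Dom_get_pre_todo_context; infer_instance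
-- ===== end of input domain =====

-- B replaces "build the whole filtered list, then slice its last two" by a backward scan
-- with a bounded two-element buffer and early exit; same return value on every non-empty list.

-- ===== PORT A =====
def get_pre_todo_context (source_code : List (Int × String)) (todo_lineno : Int) : List (Int × String) :=
  let line_limit : Int := 10
  -- source_code[0][0]: IndexError on []; excluded by Pre_, headD is a placeholder there
  let first := (source_code.headD (0, "")).1
  let start_lineno := if todo_lineno - line_limit < first then first else todo_lineno - line_limit
  let pre_todo_context := source_code.foldl
    (fun acc e => if e.1 ≥ start_lineno ∧ e.1 < todo_lineno then acc ++ [e] else acc) []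
  PySem.List.slice pre_todo_context (some (-2)) none

-- ===== PORT B =====
def pvAltLoop (start_lineno todo_lineno : Int) :
    List (Int × String) → List (Int × String) → List (Int × String)
  | [], buf => buf
  | e :: rest, buf =>
    if start_lineno ≤ e.1 ∧ e.1 < todo_lineno then
      let buf' := buf ++ [e]
      if buf'.length = 2 then buf' else pvAltLoop start_lineno todo_lineno rest buf'
    else pvAltLoop start_lineno todo_lineno rest buf

def get_pre_todo_context_alt (source_code : List (Int × String)) (todo_lineno : Int) : List (Int × String) :=
  let line_limit : Int := 10
  let first := (source_code.headD (0, "")).1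
  let start_lineno := if todo_lineno - line_limit < first then first else todo_lineno - line_limit
  (pvAltLoop start_lineno todo_lineno source_code.reverse []).reverse

-- ===== PRECONDITION & SPEC =====
-- Pre_ excludes only the empty list, on which A raises IndexError at source_code[0][0] (B raises there too).
def Pre_get_pre_todo_context (source_code : List (Int × String)) (todo_lineno : Int) : Prop :=
  source_code ≠ []
instance (source_code : List (Int × String)) (todo_lineno : Int) : Decidable (Pre_get_pre_todo_context source_code todo_lineno) := by unfold Pre_get_pre_todo_context; infer_instance

def pvWitness_get_pre_todo_context : (List (Int × String)) × Int := ([(1, "a"), (2, "b"), (3, "c")], 4)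

def Spec_get_pre_todo_context (source_code : List (Int × String)) (todo_lineno : Int) (out : List (Int × String)) : Prop := out = get_pre_todo_context_alt source_code todo_lineno
instance (source_code : List (Int × String)) (todo_lineno : Int) (out : List (Int × String)) : Decidable (Spec_get_pre_todo_context source_code todo_lineno out) := by unfold Spec_get_pre_todo_context; infer_instance

-- ===== CLAIM (what is proved, stated in full; the proofs are below) =====
def Claim_equal_get_pre_todo_context : Prop := ∀ (source_code : List (Int × String)) (todo_lineno : Int), Dom_get_pre_todo_context source_code todo_lineno → Pre_get_pre_todo_context source_code todo_lineno → Spec_get_pre_todo_context source_code todo_lineno (get_pre_todo_context source_code todo_lineno)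

-- ===== LEMMAS AND PROOFS =====

-- B's loop on a buffer shorter than 2 collects the first two matches of the remaining list.
theorem pvAltLoop_eq_take (s t : Int) (l buf : List (Int × String)) (h : buf.length < 2) :
    pvAltLoop s t l buf
      = (buf ++ l.filter (fun e => decide (s ≤ e.1) && decide (e.1 < t))).take 2 := by
  induction l generalizing buf with
  | nil => simp [pvAltLoop, List.take_of_length_le (by omega : buf.length ≤ 2)]
  | cons e rest ih =>
    simp only [pvAltLoop]
    by_cases hp : s ≤ e.1 ∧ e.1 < t
    · rw [if_pos hp, List.filter_cons_of_pos (by simp [hp.1, hp.2])]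
      conv_rhs => rw [List.append_cons]
      by_cases h2 : (buf ++ [e]).length = 2
      · rw [if_pos h2, ← h2, List.take_left]
      · rw [if_neg h2, ih (buf ++ [e]) (by simp only [List.length_append, List.length_cons, List.length_nil] at h2 ⊢; omega)]
    · rw [if_neg hp, List.filter_cons_of_neg (by simpa using hp)]
      exact ih buf h

theorem get_pre_todo_context_spec : Claim_equal_get_pre_todo_context := by
  intro sc t _ _
  unfold Spec_get_pre_todo_context get_pre_todo_context get_pre_todo_context_alt
  simp only []
  set s := if t - 10 < (sc.headD (0, "")).1 then (sc.headD (0, "")).1 else t - 10 with hs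
  rw [PySem.List.foldl_append_ite_eq_filter (fun e : Int × String => e.1 ≥ s ∧ e.1 < t) sc [],
      pvAltLoop_eq_take s t sc.reverse [] (by simp), List.nil_append, List.nil_append,
      List.filter_reverse, List.take_reverse, List.reverse_reverse,
      PySem.List.slice_from_neg_ofNat _ 2 (by omega)]
  have hfun : (fun e : Int × String => decide (e.1 ≥ s ∧ e.1 < t))
      = (fun e : Int × String => decide (s ≤ e.1) && decide (e.1 < t)) := by
    funext e; simp [ge_iff_le]
  rw [hfun]
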